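-- pv_equiv track=rewrite | github.com/kiwidude68/calibre_plugins | goodreads_sync/core.py | _convert_goodreads_title_with_series
-- ===== SOURCE A (Python) =====
-- def _convert_goodreads_title_with_series(text):
--     # This function attempts to convert a myriad of Goodreads title
--     # combinations to strip out the series information as it is not
--     # available separately in the API
--     if text.find('(') == -1:
--         return (text, '')
--     text_split = text.rpartition('(')
--     title = text_split[0]
--     series_info = text_split[2]
--     series_info = series_info.rpartition(')')
--     series_info = series_info[0]
--     hash_pos = series_info.find('#')
--     if hash_pos <= 0:
--         # Cannot find the series # in expression or at start like (#1-7)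
--         # so consider whole thing just as title
--         title = text
--         series_info = ''
--     else:
--         # Check to make sure we have got all of the series information
--         while series_info.count(')') != series_info.count('('):
--             title_split = title.rpartition('(')
--             title = title_split[0].strip()
--             series_info = title_split[2] + '(' + series_info
--     if series_info:
--         series_partition = series_info.rpartition('#')
--         series_name = series_partition[0].strip().replace(',', '')
--         series_index = series_partition[2].strip()
--         if series_index.find('-'):
--             # The series is specified as 1-3, 1-7 etc.
--             # In future we may offer config options to decide what to do,
--             # such as "Use start number", "Use value xxx" like 0 etc.
--             # For now will just take the start number and use that
--             series_index = series_index.partition('-')[0].strip()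
--         series_info = '%s [%s]' % (series_name, series_index)
--     return (title.strip(), series_info)
-- ===== SOURCE B (Python) =====
-- def _convert_goodreads_title_with_series(text):
--     # One split at '(' up front, then an index walk over whole segments to find
--     # where the trailing parenthetical series group starts; title and series are
--     # rebuilt by joining the untouched segments.
--     parts = text.split('(')
--     if len(parts) == 1:
--         return (text, '')
--     cut = parts[-1].rfind(')')
--     inner = parts[-1][:cut] if cut != -1 else ''
--     if inner.find('#') <= 0:
--         return (text.strip(), '')
--     # the group may close parentheses opened earlier in the title:
--     # move whole segments into it until the parentheses balance
--     m = len(parts) - 1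
--     need = inner.count(')')          # unmatched ')' still to close ('(' cannot occur here)
--     while need > 0 and m > 0:
--         m -= 1
--         need += parts[m].count(')') - 1
--     title = '('.join(parts[:m])
--     series_info = '('.join(parts[m:-1] + [inner])
--     series_name, _, series_index = series_info.rpartition('#')
--     series_name = series_name.strip().replace(',', '')
--     series_index = series_index.strip()
--     if not series_index.startswith('-'):
--         series_index = series_index.partition('-')[0].strip()
--     return (title.strip(), '%s [%s]' % (series_name, series_index))
-- ===== Notes on version B (the rewrite author's own statement) =====
-- stated objective: alternative
-- what changed: B splits the text at '(' once and walks a segment index down with a running count of unmatched ')' to find where the trailing series group starts, then rebuilds title and series by joining the untouched segments, instead of A's while-loop that repeatedly rpartitions and strips the title while re-concatenating series_info; …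
-- outside the precondition, e.g. on _convert_goodreads_title_with_series('a (b (c (d) ) #1)'): A returns ('a', 'b(c (d) ) [1]'), B returns ('a', 'b (c (d) ) [1]'); on _convert_goodreads_title_with_series(') (b) c #1)'): A returns ('', '() (b) c [1]'), B returns ('', ') (b) c [1]')
import Mathlib
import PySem

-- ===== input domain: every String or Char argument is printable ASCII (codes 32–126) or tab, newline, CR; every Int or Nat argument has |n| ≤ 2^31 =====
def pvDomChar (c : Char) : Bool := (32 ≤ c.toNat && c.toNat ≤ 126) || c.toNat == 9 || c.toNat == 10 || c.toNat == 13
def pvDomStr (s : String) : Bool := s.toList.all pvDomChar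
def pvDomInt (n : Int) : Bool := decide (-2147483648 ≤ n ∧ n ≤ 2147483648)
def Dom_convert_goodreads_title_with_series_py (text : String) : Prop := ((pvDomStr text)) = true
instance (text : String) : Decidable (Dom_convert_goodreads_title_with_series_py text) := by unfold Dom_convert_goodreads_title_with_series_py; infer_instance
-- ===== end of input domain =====

-- B replaces A's repeated rpartition-strip-and-rebuild while-loop by one split at '(' plus a
-- segment-index countdown; Pre_ excludes the whitespace/unbalanced-paren corner where the two
-- reconstructions of the series text legitimately disagree (see the sentence above Pre_).

-- ===== PORT A =====
-- hand port of str.rpartition(sep) for a 1-char sep: some (before, after) at the LAST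
-- occurrence, none when sep is absent (Python returns ('','',s) there); exact.
def pyRpartition (c : Char) : List Char → Option (List Char × List Char)
  | [] => none
  | x :: xs =>
    match pyRpartition c xs with
    | some (a, b) => some (x :: a, b)
    | none => if x = c then some ([], xs) else none

-- hand port of str.partition(sep) for a 1-char sep: some (before, after) at the FIRST
-- occurrence, none when sep is absent (Python returns (s,'','') there); exact.
def pyPartition (c : Char) : List Char → Option (List Char × List Char)
  | [] => none
  | x :: xs =>
    if x = c then some ([], xs) else
      match pyPartition c xs with
      | some (a, b) => some (x :: a, b)
      | none => none

-- A's final formatting block (rpartition on '#', strip/replace, '-' handling), transliterated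
def formatSeries (series : List Char) : List Char :=
  let namepart := match pyRpartition '#' series with | some (a, _) => a | none => []
  let idxpart := match pyRpartition '#' series with | some (_, b) => b | none => series
  let name := PySem.Chars.replace (PySem.Chars.strip namepart) [','] []
  let idx0 := PySem.Chars.strip idxpart
  let idx := if PySem.Chars.find idx0 ['-'] ≠ 0 then
      PySem.Chars.strip (match pyPartition '-' idx0 with | some (a, _) => a | none => idx0)
    else idx0
  name ++ ' ' :: '[' :: (idx ++ [']'])

-- A's while-loop; the fuel argument is only a totality guard (Python has no bound); the
-- caller passes fuel strictly above the loop's decreasing measure, so it never runs out.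
def loopA (fuel : Nat) (title series : List Char) : List Char × List Char :=
  match fuel with
  | 0 => (title, series)
  | fuel + 1 =>
    if PySem.Chars.count series [')'] ≠ PySem.Chars.count series ['('] then
      match pyRpartition '(' title with
      | some (pre, tail) => loopA fuel (PySem.Chars.strip pre) (tail ++ '(' :: series)
      | none => loopA fuel (PySem.Chars.strip []) (title ++ '(' :: series)
    else (title, series)

def convert_goodreads_title_with_series_py (text : String) : String × String :=
  let s := text.toList
  if PySem.Chars.find s ['('] = -1 then (text, "") else
  let tp := match pyRpartition '(' s with
    | some (a, b) => (a, b)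
    | none => (([] : List Char), s)      -- Python rpartition: ('','',s)
  let series1 := match pyRpartition ')' tp.2 with
    | some (a, _) => a
    | none => ([] : List Char)           -- rpartition(')')[0] is '' when ')' absent
  let hashPos := PySem.Chars.find series1 ['#']
  let st :=
    if hashPos ≤ 0 then (s, ([] : List Char))
    else loopA (tp.1.length + PySem.Chars.count series1 [')'] + 1) tp.1 series1
  let series3 := if st.2.isEmpty then st.2 else formatSeries st.2
  (String.ofList (PySem.Chars.strip st.1), String.ofList series3)

-- ===== PORT B =====
-- B's while-loop: walk the segment index down while unmatched ')' remain (state = (m, need))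
def loopCut (parts : List (List Char)) : Nat → Nat → Nat × Nat
  | 0, need => (0, need)
  | m + 1, need =>
    if 0 < need then
      loopCut parts m (need + PySem.Chars.count (parts.getD m []) [')'] - 1)
    else (m + 1, need)

-- B's final formatting block (Source B uses startswith instead of A's find test)
def formatSeriesB (series : List Char) : List Char :=
  let namepart := match pyRpartition '#' series with | some (a, _) => a | none => []
  let idxpart := match pyRpartition '#' series with | some (_, b) => b | none => series
  let name := PySem.Chars.replace (PySem.Chars.strip namepart) [','] []
  let idx0 := PySem.Chars.strip idxpart
  let idx := if PySem.Chars.startswith idx0 ['-'] = false then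
      PySem.Chars.strip (match pyPartition '-' idx0 with | some (a, _) => a | none => idx0)
    else idx0
  name ++ ' ' :: '[' :: (idx ++ [']'])

def convert_goodreads_title_with_series_py_alt (text : String) : String × String :=
  let s := text.toList
  let parts := PySem.Chars.splitOn s ['(']
  if parts.length = 1 then (text, "") else
  let lastp := parts.getLastD []
  let cut := PySem.Chars.rfind lastp [')']
  let inner := if cut ≠ -1 then PySem.List.slice lastp none (some cut) else []
  if PySem.Chars.find inner ['#'] ≤ 0 then (String.ofList (PySem.Chars.strip s), "") else
  let m := (loopCut parts (parts.length - 1) (PySem.Chars.count inner [')'])).1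
  let title := List.intercalate ['('] (parts.take m)
  let series := List.intercalate ['('] ((parts.drop m).dropLast ++ [inner])
  (String.ofList (PySem.Chars.strip title), String.ofList (formatSeriesB series))

-- ===== PRECONDITION & SPEC =====
-- scan the title right-to-left from the '(' that opens the trailing series group, with the
-- group's unmatched-')' depth: true when the group never balances (A pads '(' characters)
-- or when whitespace stands immediately left of a '(' the re-balancing crosses (A strips it)
def wsScan : List Char → Nat → Bool
  | [], d => decide (1 < d)
  | c :: rest, d =>
    if c = '(' then
      if d = 1 then false
      else (rest.head?.any PySem.Chars.isspace || wsScan rest (d - 1))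
    else wsScan rest (if c = ')' then d + 1 else d)

-- the text after the last '(' (reversed), and the series text inside the trailing group (reversed)
def afterOpenRev (s : List Char) : List Char := s.reverse.takeWhile (· != '(')
def innerRev (s : List Char) : List Char := ((afterOpenRev s).dropWhile (· != ')')).tail

-- Boolean scan behind Pre_: true exactly on the excluded corner described above Pre_
def dCheck (s : List Char) : Bool :=
  s.contains '(' && (afterOpenRev s).contains ')' &&
  (innerRev s).contains '#' && !((innerRev s).getLast? == some '#') &&
  (innerRev s).count ')' != 0 &&
  wsScan ((s.reverse.dropWhile (· != '(')).tail) ((innerRev s).count ')')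

-- Pre_ excludes titles whose trailing series group (one holding a '#') has to absorb extra
-- '('-segments across adjacent whitespace, or whose parentheses never balance: the exact
-- whitespace/padding of the reconstructed series text is an unspecified corner there — A
-- re-concatenates the peeled segments with intermediate strips, B slices the original text,
-- and either rendering is defensible.
def Pre_convert_goodreads_title_with_series_py (text : String) : Prop :=
  dCheck text.toList = false
instance (text : String) : Decidable (Pre_convert_goodreads_title_with_series_py text) := by
  unfold Pre_convert_goodreads_title_with_series_py; infer_instance

def pvWitness_convert_goodreads_title_with_series_py : String := "a (b #1)"

def Spec_convert_goodreads_title_with_series_py (text : String) (out : String × String) : Prop :=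
  out = convert_goodreads_title_with_series_py_alt text
instance (text : String) (out : String × String) : Decidable (Spec_convert_goodreads_title_with_series_py text out) := by
  unfold Spec_convert_goodreads_title_with_series_py; infer_instance

-- ===== CLAIM (what is proved, stated in full; the proofs are below) =====
def Claim_equal_convert_goodreads_title_with_series_py : Prop := ∀ (text : String), Dom_convert_goodreads_title_with_series_py text → Pre_convert_goodreads_title_with_series_py text → Spec_convert_goodreads_title_with_series_py text (convert_goodreads_title_with_series_py text)

-- ===== LEMMAS AND PROOFS =====

-- A's rebuild loop, abstracted as a walk that pops segments off the right end while the
-- parenthesis deficit is positive, recording the (possibly stripped) pieces (proof gadget)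
def pieceWalk (kept pieces : List (List Char)) (first : Bool) (d : Nat) :
    List (List Char) × List (List Char) × Nat :=
  if h : 0 < d ∧ kept ≠ [] then
    let seg := kept.getLastD []
    let kept' := kept.dropLast
    let piece := if first then seg
      else if kept' = [] then PySem.Chars.strip seg else PySem.Chars.rstrip seg
    pieceWalk kept' (pieces ++ [piece]) false (d + PySem.Chars.count piece [')'] - 1)
  else (kept, pieces, d)
termination_by kept.length
decreasing_by
  have h2 : 0 < kept.length := List.length_pos_of_ne_nil h.2
  rw [List.length_dropLast]
  omega

-- ---- count : single-char needle is List.count ----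
theorem count_go_nil (c : Char) (f acc : Nat) : PySem.Chars.count.go [c] f [] acc = acc := by
  cases f <;> simp [PySem.Chars.count.go]

theorem count_go_cons (c x : Char) (xs : List Char) (f acc : Nat) :
    PySem.Chars.count.go [c] (f+1) (x::xs) acc =
      if c = x then PySem.Chars.count.go [c] f xs (acc+1) else PySem.Chars.count.go [c] f xs acc := by
  simp only [PySem.Chars.count.go]
  by_cases h : c = x
  · subst h; simp [List.isPrefixOf]
  · simp [List.isPrefixOf, h]

theorem count_go_single (c : Char) :
    ∀ (l : List Char) (fuel acc : Nat), l.length ≤ fuel →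
      PySem.Chars.count.go [c] fuel l acc = acc + l.count c := by
  intro l
  induction l with
  | nil => intro fuel acc _; simp [count_go_nil]
  | cons x xs ih =>
    intro fuel acc h
    cases fuel with
    | zero => simp at h
    | succ f =>
      have hlen : xs.length ≤ f := by simp at h; omega
      rw [count_go_cons]
      by_cases hx : c = x
      · rw [if_pos hx, ih f (acc+1) hlen, List.count_cons]
        simp [hx]; omega
      · rw [if_neg hx, ih f acc hlen, List.count_cons]
        simp [Ne.symm hx]

theorem count_single (l : List Char) (c : Char) :
    PySem.Chars.count l [c] = l.count c := by
  simpa [PySem.Chars.count] using count_go_single c l l.length 0 le_rfl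

-- ---- splitOn on a single-char separator : reference function myS ----
def myS (c : Char) (pre : List Char) : List Char → List (List Char)
  | [] => [pre]
  | x :: xs => if x = c then pre :: myS c [] xs else myS c (pre ++ [x]) xs

theorem splitOn_go_nil (c : Char) (cur : List Char) (f : Nat) (acc : List (List Char)) :
    PySem.Chars.splitOn.go [c] (f+1) [] cur acc = (cur.reverse :: acc).reverse := by
  simp [PySem.Chars.splitOn.go]

theorem splitOn_go_cons (c x : Char) (xs cur : List Char) (f : Nat) (acc : List (List Char)) :
    PySem.Chars.splitOn.go [c] (f+1) (x::xs) cur acc =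
      if c = x then PySem.Chars.splitOn.go [c] f xs [] (cur.reverse :: acc)
      else PySem.Chars.splitOn.go [c] f xs (x :: cur) acc := by
  simp only [PySem.Chars.splitOn.go]
  by_cases h : c = x
  · subst h; simp [List.isPrefixOf]
  · simp [List.isPrefixOf, h]

theorem splitOn_go_single (c : Char) :
    ∀ (l : List Char) (fuel : Nat) (cur : List Char) (acc : List (List Char)),
      l.length < fuel →
      PySem.Chars.splitOn.go [c] fuel l cur acc = acc.reverse ++ myS c cur.reverse l := by
  intro l
  induction l with
  | nil =>
    intro fuel cur acc h
    cases fuel with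
    | zero => simp at h
    | succ f => simp [splitOn_go_nil, myS]
  | cons x xs ih =>
    intro fuel cur acc h
    cases fuel with
    | zero => simp at h
    | succ f =>
      have hlen : xs.length < f := by simp at h; omega
      rw [splitOn_go_cons]
      by_cases hx : c = x
      · rw [if_pos hx, ih f [] (cur.reverse :: acc) hlen]
        simp [myS, hx]
      · rw [if_neg hx, ih f (x :: cur) acc hlen]
        simp [myS, Ne.symm hx]

theorem splitOn_single (s : List Char) (c : Char) :
    PySem.Chars.splitOn s [c] = myS c [] s := by
  simpa [PySem.Chars.splitOn] using splitOn_go_single c s (s.length + 1) [] [] (by omega)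

theorem intercalate_cons_cons' (s a b : List Char) (l : List (List Char)) :
    List.intercalate s (a :: b :: l) = a ++ s ++ List.intercalate s (b :: l) := by
  simp [List.intercalate, List.intersperse]

theorem intercalate_cons_ne (c : Char) (pre : List Char) (ps : List (List Char)) (h : ps ≠ []) :
    List.intercalate [c] (pre :: ps) = pre ++ c :: List.intercalate [c] ps := by
  cases ps with
  | nil => exact absurd rfl h
  | cons q qs => rw [intercalate_cons_cons']; simp

theorem myS_ne_nil (c : Char) (l : List Char) : ∀ (pre : List Char), myS c pre l ≠ [] := by
  induction l with
  | nil => intro pre; simp [myS]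
  | cons x xs ih =>
    intro pre
    by_cases hx : x = c <;> simp [myS, hx, ih]

theorem myS_intercalate (c : Char) :
    ∀ (l pre : List Char), List.intercalate [c] (myS c pre l) = pre ++ l := by
  intro l
  induction l with
  | nil => intro pre; simp [myS, List.intercalate]
  | cons x xs ih =>
    intro pre
    by_cases hx : x = c
    · rw [myS, if_pos hx, intercalate_cons_ne c pre _ (myS_ne_nil c xs []), ih []]
      simp [hx]
    · rw [myS, if_neg hx, ih (pre ++ [x])]
      simp

theorem myS_free (c : Char) :
    ∀ (l pre : List Char), c ∉ pre → ∀ p ∈ myS c pre l, c ∉ p := by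
  intro l
  induction l with
  | nil => intro pre hpre p hp; simp [myS] at hp; subst hp; exact hpre
  | cons x xs ih =>
    intro pre hpre p hp
    by_cases hx : x = c
    · rw [myS, if_pos hx] at hp
      rcases List.mem_cons.mp hp with rfl | hp
      · exact hpre
      · exact ih [] (by simp) p hp
    · rw [myS, if_neg hx] at hp
      exact ih (pre ++ [x]) (by simp [hpre, Ne.symm hx]) p hp

theorem myS_length_one_iff (c : Char) :
    ∀ (l pre : List Char), (myS c pre l).length = 1 ↔ c ∉ l := by
  intro l
  induction l with
  | nil => intro pre; simp [myS]
  | cons x xs ih =>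
    intro pre
    by_cases hx : x = c
    · rw [myS, if_pos hx]
      have hne := myS_ne_nil c xs []
      constructor
      · intro h; exfalso
        cases hmy : myS c [] xs with
        | nil => exact hne hmy
        | cons a l => rw [hmy] at h; simp at h
      · intro h; exfalso; exact h (by simp [hx])
    · rw [myS, if_neg hx]
      rw [ih (pre ++ [x])]
      simp [Ne.symm hx]

-- ---- pyRpartition / pyPartition specs ----
theorem rpart_of_not_mem (c : Char) : ∀ (s : List Char), c ∉ s → pyRpartition c s = none := by
  intro s
  induction s with
  | nil => intro _; rfl
  | cons x xs ih =>
    intro h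
    simp at h
    rw [pyRpartition, ih h.2]
    simp [Ne.symm h.1]

theorem rpart_append_last (c : Char) (b : List Char) (hb : c ∉ b) :
    ∀ (a : List Char), pyRpartition c (a ++ c :: b) = some (a, b) := by
  intro a
  induction a with
  | nil =>
    rw [List.nil_append, pyRpartition, rpart_of_not_mem c b hb]
    simp
  | cons x xs ih =>
    rw [List.cons_append, pyRpartition, ih]

theorem exists_last_decomp (c : Char) :
    ∀ (s : List Char), c ∈ s → ∃ a b, s = a ++ c :: b ∧ c ∉ b := by
  intro s
  induction s with
  | nil => intro h; simp at h
  | cons x xs ih =>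
    intro h
    by_cases hxs : c ∈ xs
    · obtain ⟨a, b, rfl, hb⟩ := ih hxs
      exact ⟨x :: a, b, rfl, hb⟩
    · rcases List.mem_cons.mp h with rfl | h'
      · exact ⟨[], xs, rfl, hxs⟩
      · exact absurd h' hxs

-- ---- find / rfind on single chars ----
theorem infix_singleton_iff (c : Char) (s : List Char) : [c] <:+: s ↔ c ∈ s := by
  constructor
  · rintro ⟨u, v, rfl⟩; simp
  · intro h
    obtain ⟨u, v, rfl⟩ := List.append_of_mem h
    exact ⟨u, v, by simp⟩

theorem find_single_eq_neg_one_iff (s : List Char) (c : Char) :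
    PySem.Chars.find s [c] = -1 ↔ c ∉ s := by
  rw [PySem.Chars.find_eq_neg_one_iff, infix_singleton_iff]

theorem find_nil_single (c : Char) : PySem.Chars.find [] [c] = -1 := by
  simp [PySem.Chars.find, PySem.Chars.find.go]

theorem prefix_single_mem (c : Char) (l : List Char) (h : [c].isPrefixOf l = true) : c ∈ l := by
  cases l with
  | nil => simp [List.isPrefixOf] at h
  | cons x xs => simp [List.isPrefixOf] at h; simp [h]

theorem rfind_go_succ (s sub : List Char) (j : Nat) :
    PySem.Chars.rfind.go s sub (j+1) =
      if sub.isPrefixOf (s.drop (j+1)) then ((j+1 : Nat) : Int) else PySem.Chars.rfind.go s sub j := by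
  simp only [PySem.Chars.rfind.go]

theorem rfind_go_zero (s sub : List Char) :
    PySem.Chars.rfind.go s sub 0 = if sub.isPrefixOf s then (0 : Int) else -1 := by
  simp only [PySem.Chars.rfind.go]

theorem rfind_go_const (s : List Char) (c : Char) :
    ∀ (k t : Nat), t ≤ k →
      (∀ j, t < j → j ≤ k → ¬ ([c].isPrefixOf (s.drop j) = true)) →
      PySem.Chars.rfind.go s [c] k = PySem.Chars.rfind.go s [c] t := by
  intro k
  induction k with
  | zero => intro t ht _; interval_cases t; rfl
  | succ j ih =>
    intro t ht h
    by_cases hteq : t = j + 1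
    · subst hteq; rfl
    · have ht' : t ≤ j := by omega
      rw [rfind_go_succ, if_neg (by simpa using h (j+1) (by omega) le_rfl)]
      exact ih t ht' (fun i hi hi2 => h i hi (by omega))

theorem rfind_single_not_mem (s : List Char) (c : Char) (h : c ∉ s) :
    PySem.Chars.rfind s [c] = -1 := by
  unfold PySem.Chars.rfind
  rw [rfind_go_const s c s.length 0 (by omega)
      (fun j _ _ hpre => h (List.mem_of_mem_drop (prefix_single_mem c _ hpre)))]
  rw [rfind_go_zero]
  rw [if_neg (fun hpre => h (prefix_single_mem c s hpre))]

theorem rfind_go_hit (s : List Char) (c : Char) (t : Nat)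
    (h : [c].isPrefixOf (s.drop t) = true) :
    PySem.Chars.rfind.go s [c] t = (t : Int) := by
  cases t with
  | zero => simpa [rfind_go_zero] using (by simpa using h)
  | succ j => rw [rfind_go_succ, if_pos h]

theorem rfind_single_last (a b : List Char) (c : Char) (hb : c ∉ b) :
    PySem.Chars.rfind (a ++ c :: b) [c] = (a.length : Int) := by
  unfold PySem.Chars.rfind
  have hlen : a.length ≤ (a ++ c :: b).length := by simp
  rw [rfind_go_const (a ++ c :: b) c (a ++ c :: b).length a.length (by simpa using hlen) ?later]
  · apply rfind_go_hit
    rw [List.drop_left]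
    simp [List.isPrefixOf]
  · intro j hj _ hpre
    have hdrop : (a ++ c :: b).drop j = b.drop (j - a.length - 1) := by
      have : j = a.length + (j - a.length - 1) + 1 := by omega
      rw [this, show a.length + (j - a.length - 1) + 1 = a.length + ((j - a.length - 1) + 1) by omega,
        List.drop_append]
      simp
    rw [hdrop] at hpre
    exact hb (List.mem_of_mem_drop (prefix_single_mem c _ hpre))

-- ---- strip family ----
theorem lstrip_append_cons (c : Char) (hc : PySem.Chars.isspace c = false) (u v : List Char) :
    PySem.Chars.lstrip (u ++ c :: v) = PySem.Chars.lstrip u ++ c :: v := by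
  unfold PySem.Chars.lstrip
  rw [List.dropWhile_append]
  split
  · next h =>
    have hu : List.dropWhile PySem.Chars.isspace u = [] := by
      simpa using h
    rw [hu, List.dropWhile_cons, if_neg (by simp [hc])]
    simp
  · rfl

theorem rstrip_append_cons (c : Char) (hc : PySem.Chars.isspace c = false) (u v : List Char) :
    PySem.Chars.rstrip (u ++ c :: v) = u ++ c :: PySem.Chars.rstrip v := by
  unfold PySem.Chars.rstrip
  rw [show (u ++ c :: v).reverse = v.reverse ++ c :: u.reverse by simp]
  rw [List.dropWhile_append]
  split
  · next h =>
    have hv : List.dropWhile PySem.Chars.isspace v.reverse = [] := by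
      simpa using h
    rw [List.dropWhile_cons, if_neg (by simp [hc])]
    simp [hv]
  · next h => simp

theorem strip_append_cons (c : Char) (hc : PySem.Chars.isspace c = false) (u v : List Char) :
    PySem.Chars.strip (u ++ c :: v) = PySem.Chars.lstrip u ++ c :: PySem.Chars.rstrip v := by
  unfold PySem.Chars.strip
  rw [lstrip_append_cons c hc, rstrip_append_cons c hc]

theorem dropWhile_idem' {p : Char → Bool} (l : List Char) :
    List.dropWhile p (List.dropWhile p l) = List.dropWhile p l := by
  induction l with
  | nil => rfl
  | cons x xs ih =>
    by_cases hx : p x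
    · simp [hx, ih]
    · simp [hx]

theorem lstrip_lstrip (s : List Char) :
    PySem.Chars.lstrip (PySem.Chars.lstrip s) = PySem.Chars.lstrip s := by
  unfold PySem.Chars.lstrip; exact dropWhile_idem' s

theorem rstrip_rstrip (s : List Char) :
    PySem.Chars.rstrip (PySem.Chars.rstrip s) = PySem.Chars.rstrip s := by
  unfold PySem.Chars.rstrip
  rw [List.reverse_reverse, dropWhile_idem']

theorem rstrip_prefix (s : List Char) : PySem.Chars.rstrip s <+: s := by
  unfold PySem.Chars.rstrip
  conv_rhs => rw [← List.reverse_reverse s]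
  exact List.reverse_prefix.mpr (List.dropWhile_suffix _)

theorem lstrip_eq_self_head (s : List Char) (x : Char) (t : List Char)
    (hs : PySem.Chars.lstrip s = s) (hx : s = x :: t) : PySem.Chars.isspace x = false := by
  subst hx
  by_contra h
  have hx' : PySem.Chars.isspace x = true := by
    cases hh : PySem.Chars.isspace x
    · exact absurd hh h
    · rfl
  unfold PySem.Chars.lstrip at hs
  rw [List.dropWhile_cons, if_pos hx'] at hs
  have := congrArg List.length hs
  have hle := List.Sublist.length_le (List.dropWhile_sublist (l := t) PySem.Chars.isspace)
  simp at this
  omega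

theorem lstrip_rstrip_of_fixed (w : List Char) (hw : PySem.Chars.lstrip w = w) :
    PySem.Chars.lstrip (PySem.Chars.rstrip w) = PySem.Chars.rstrip w := by
  cases hr : PySem.Chars.rstrip w with
  | nil => rfl
  | cons x t =>
    obtain ⟨rest, hrest⟩ := rstrip_prefix w
    rw [hr] at hrest
    have hxw : PySem.Chars.isspace x = false :=
      lstrip_eq_self_head w x (t ++ rest) hw (by rw [← hrest]; simp)
    unfold PySem.Chars.lstrip
    rw [List.dropWhile_cons, if_neg (by simp [hxw])]

theorem strip_lstrip (s : List Char) :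
    PySem.Chars.strip (PySem.Chars.lstrip s) = PySem.Chars.strip s := by
  unfold PySem.Chars.strip
  rw [lstrip_lstrip]

theorem strip_strip (s : List Char) :
    PySem.Chars.strip (PySem.Chars.strip s) = PySem.Chars.strip s := by
  unfold PySem.Chars.strip
  rw [lstrip_rstrip_of_fixed (PySem.Chars.lstrip s) (lstrip_lstrip s), rstrip_rstrip]

theorem strip_nil : PySem.Chars.strip [] = [] := rfl

theorem lstrip_sublist (s : List Char) : List.Sublist (PySem.Chars.lstrip s) s :=
  List.dropWhile_sublist _

theorem rstrip_sublist (s : List Char) : List.Sublist (PySem.Chars.rstrip s) s :=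
  (rstrip_prefix s).sublist

theorem strip_sublist (s : List Char) : List.Sublist (PySem.Chars.strip s) s :=
  (rstrip_sublist _).trans (lstrip_sublist s)

theorem length_strip_le (s : List Char) : (PySem.Chars.strip s).length ≤ s.length :=
  (strip_sublist s).length_le

theorem length_rstrip_le (s : List Char) : (PySem.Chars.rstrip s).length ≤ s.length :=
  (rstrip_sublist s).length_le

theorem not_mem_strip (c : Char) (s : List Char) (h : c ∉ s) : c ∉ PySem.Chars.strip s :=
  fun hc => h ((strip_sublist s).mem hc)

theorem not_mem_rstrip (c : Char) (s : List Char) (h : c ∉ s) : c ∉ PySem.Chars.rstrip s :=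
  fun hc => h ((rstrip_sublist s).mem hc)

-- ---- intercalate helpers ----
theorem intercalate_concat (c : Char) (ks : List (List Char)) (hks : ks ≠ []) (seg : List Char) :
    List.intercalate [c] (ks ++ [seg]) = List.intercalate [c] ks ++ c :: seg := by
  induction ks with
  | nil => exact absurd rfl hks
  | cons a ks' ih =>
    cases ks' with
    | nil => rw [List.cons_append, List.nil_append, intercalate_cons_cons']; simp [List.intercalate]
    | cons b ks'' =>
      rw [List.cons_append, intercalate_cons_ne c a _ (by simp),
        intercalate_cons_ne c a _ (by simp), ih (by simp)]
      simp

-- ---- loop lemmas for A (walk characterization) ----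
def mkTitle (b : Bool) (kept : List (List Char)) : List Char :=
  if b then List.intercalate ['('] kept else PySem.Chars.strip (List.intercalate ['('] kept)

theorem intercalate_nil' (c : Char) : List.intercalate [c] ([] : List (List Char)) = [] := rfl

theorem loopA_stop (f : Nat) (title ser : List Char)
    (h : ¬ PySem.Chars.count ser [')'] ≠ PySem.Chars.count ser ['(']) :
    loopA (f+1) title ser = (title, ser) := by
  rw [loopA, if_neg h]

theorem loopA_step_some (f : Nat) (title pre tail ser : List Char)
    (hcond : PySem.Chars.count ser [')'] ≠ PySem.Chars.count ser ['('])
    (hr : pyRpartition '(' title = some (pre, tail)) :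
    loopA (f+1) title ser = loopA f (PySem.Chars.strip pre) (tail ++ '(' :: ser) := by
  rw [loopA, if_pos hcond, hr]

theorem loopA_step_none (f : Nat) (title ser : List Char)
    (hcond : PySem.Chars.count ser [')'] ≠ PySem.Chars.count ser ['('])
    (hr : pyRpartition '(' title = none) :
    loopA (f+1) title ser = loopA f (PySem.Chars.strip []) (title ++ '(' :: ser) := by
  rw [loopA, if_pos hcond, hr]

theorem pieceWalk_stop (kept ps : List (List Char)) (b : Bool) (d : Nat)
    (h : ¬ (0 < d ∧ kept ≠ [])) : pieceWalk kept ps b d = (kept, ps, d) := by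
  rw [pieceWalk, dif_neg h]

theorem pieceWalk_step (ks : List (List Char)) (seg : List Char) (ps : List (List Char)) (b : Bool)
    (d : Nat) (hd : 0 < d) :
    pieceWalk (ks ++ [seg]) ps b d =
      pieceWalk ks
        (ps ++ [if b then seg else if ks = [] then PySem.Chars.strip seg else PySem.Chars.rstrip seg])
        false
        (d + PySem.Chars.count
          (if b then seg else if ks = [] then PySem.Chars.strip seg else PySem.Chars.rstrip seg) [')'] - 1) := by
  rw [pieceWalk, dif_pos ⟨hd, by simp⟩]
  simp only [List.getLastD_concat, List.dropLast_concat]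

theorem pieceWalk_acc (kept : List (List Char)) :
    ∀ (ps : List (List Char)) (b : Bool) (d : Nat),
      pieceWalk kept ps b d =
        ((pieceWalk kept [] b d).1, ps ++ (pieceWalk kept [] b d).2.1, (pieceWalk kept [] b d).2.2) := by
  induction kept using List.reverseRecOn with
  | nil =>
    intro ps b d
    rw [pieceWalk_stop _ _ _ _ (by simp), pieceWalk_stop _ _ _ _ (by simp)]
    simp
  | append_singleton ks seg ih =>
    intro ps b d
    by_cases hd : 0 < d
    · rw [pieceWalk_step ks seg ps b d hd, pieceWalk_step ks seg [] b d hd, ih, ih ([] ++ [_])]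
      simp
    · have h : ¬ (0 < d ∧ (ks ++ [seg]) ≠ []) := fun hh => hd hh.1
      rw [pieceWalk_stop _ _ _ _ h, pieceWalk_stop _ _ _ _ h]
      simp

theorem loopA_nil (d : Nat) :
    ∀ (fuel : Nat) (ser : List Char),
      ser.count '(' ≤ ser.count ')' →
      d = ser.count ')' - ser.count '(' →
      d < fuel →
      loopA fuel [] ser = ([], List.replicate d '(' ++ ser) := by
  induction d with
  | zero =>
    intro fuel ser hle hd hf
    cases fuel with
    | zero => omega
    | succ f =>
      rw [loopA_stop f [] ser (by rw [count_single, count_single]; omega)]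
      simp
  | succ d' ih =>
    intro fuel ser hle hd hf
    cases fuel with
    | zero => omega
    | succ f =>
      rw [loopA_step_none f [] ser (by rw [count_single, count_single]; omega) rfl]
      rw [strip_nil, List.nil_append]
      rw [ih f ('(' :: ser)
        (by simp; omega)
        (by simp; omega)
        (by omega)]
      rw [show List.replicate (d'+1) '(' = List.replicate d' '(' ++ ['('] from List.replicate_succ' ..]
      simp

theorem count_append_char (u v : List Char) (c : Char) :
    (u ++ v).count c = u.count c + v.count c := List.count_append

theorem count_eq_zero_of_not_mem' (c : Char) (l : List Char) (h : c ∉ l) : l.count c = 0 :=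
  List.count_eq_zero.mpr h

theorem loopA_eq_walk (fuel : Nat) :
    ∀ (kept : List (List Char)) (ser : List Char) (b : Bool),
      (∀ p ∈ kept, '(' ∉ p) →
      ser.count '(' ≤ ser.count ')' →
      (mkTitle b kept).length + (ser.count ')' - ser.count '(') < fuel →
      PySem.Chars.strip (loopA fuel (mkTitle b kept) ser).1 =
          PySem.Chars.strip (List.intercalate ['('] (pieceWalk kept [] b (ser.count ')' - ser.count '(')).1) ∧
        (loopA fuel (mkTitle b kept) ser).2 =
          List.replicate (pieceWalk kept [] b (ser.count ')' - ser.count '(')).2.2 '(' ++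
            (((pieceWalk kept [] b (ser.count ')' - ser.count '(')).2.1.reverse).map (fun p => p ++ ['('])).flatten ++ ser := by
  induction fuel with
  | zero => intro kept ser b _ _ hf; omega
  | succ f ih =>
    intro kept ser b hfree hle hf
    by_cases hd : ser.count ')' - ser.count '(' = 0
    · rw [loopA_stop f _ ser (by rw [count_single, count_single]; omega)]
      rw [pieceWalk_stop _ _ _ _ (by omega)]
      refine ⟨?_, by simp [hd]⟩
      cases b <;> simp [mkTitle, strip_strip]
    · have hdpos : 0 < ser.count ')' - ser.count '(' := by omega
      rcases List.eq_nil_or_concat kept with rfl | ⟨ks, seg, rfl⟩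
      · have hT : mkTitle b [] = [] := by
          cases b <;> simp [mkTitle, strip_nil, intercalate_nil']
        rw [hT, loopA_nil _ (f+1) ser hle rfl (by omega)]
        rw [pieceWalk_stop _ _ _ _ (by simp)]
        exact ⟨by simp [strip_nil, intercalate_nil'], by simp⟩
      · simp only [← List.concat_eq_append] at *
        rw [List.concat_eq_append] at *
        have hseg : '(' ∉ seg := hfree seg (by simp)
        have hkfree : ∀ p ∈ ks, '(' ∉ p := fun p hp => hfree p (by simp [hp])
        set P : List Char :=
          if b then seg else if ks = [] then PySem.Chars.strip seg else PySem.Chars.rstrip seg with hP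
        have hPfree : '(' ∉ P := by
          rw [hP]; split
          · exact hseg
          · split
            · exact not_mem_strip _ _ hseg
            · exact not_mem_rstrip _ _ hseg
        have hPlen : P.length ≤ seg.length := by
          rw [hP]; split
          · exact le_rfl
          · split
            · exact length_strip_le seg
            · exact length_rstrip_le seg
        have hcond : PySem.Chars.count ser [')'] ≠ PySem.Chars.count ser ['('] := by
          rw [count_single, count_single]; omega
        have hstepA : loopA (f+1) (mkTitle b (ks ++ [seg])) ser =
            loopA f (mkTitle false ks) (P ++ '(' :: ser) := by
          rcases List.eq_nil_or_concat ks with rfl | ⟨ks', q, rfl⟩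
          · simp only [List.nil_append]
            have hT : mkTitle b [seg] = P := by
              cases b <;> simp [mkTitle, hP, List.intercalate]
            rw [hT, loopA_step_none f P ser hcond (rpart_of_not_mem '(' P hPfree)]
            simp [mkTitle, strip_nil, intercalate_nil']
          · rw [List.concat_eq_append] at *
            have hks : (ks' ++ [q]) ≠ [] := by simp
            cases b
            · have hT : mkTitle false ((ks' ++ [q]) ++ [seg]) =
                  PySem.Chars.lstrip (List.intercalate ['('] (ks' ++ [q])) ++ '(' :: PySem.Chars.rstrip seg := by
                simp only [mkTitle, if_neg (by simp : ¬ (false = true))]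
                rw [intercalate_concat '(' _ hks seg, strip_append_cons '(' (by decide)]
              have hPv : P = PySem.Chars.rstrip seg := by simp [hP, hks]
              rw [hT, loopA_step_some f _ _ _ ser hcond
                (rpart_append_last '(' _ (not_mem_rstrip _ _ hseg) _)]
              rw [← hPv, strip_lstrip]
              simp [mkTitle]
            · have hT : mkTitle true ((ks' ++ [q]) ++ [seg]) =
                  List.intercalate ['('] (ks' ++ [q]) ++ '(' :: seg := by
                simp only [mkTitle, if_pos]
                exact intercalate_concat '(' _ hks seg
              have hPv : P = seg := by simp [hP]
              rw [hT, loopA_step_some f _ _ _ ser hcond (rpart_append_last '(' _ hseg _)]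
              rw [← hPv]
              simp [mkTitle]
        have hcnt : (P ++ '(' :: ser).count '(' = ser.count '(' + 1 := by
          rw [count_append_char, count_eq_zero_of_not_mem' '(' P hPfree, List.count_cons]
          simp
        have hcnt2 : (P ++ '(' :: ser).count ')' = P.count ')' + ser.count ')' := by
          rw [count_append_char, List.count_cons]
          simp
        have hle' : (P ++ '(' :: ser).count '(' ≤ (P ++ '(' :: ser).count ')' := by
          rw [hcnt, hcnt2]; omega
        have hd' : (P ++ '(' :: ser).count ')' - (P ++ '(' :: ser).count '(' =
            (ser.count ')' - ser.count '(') + PySem.Chars.count P [')'] - 1 := by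
          rw [hcnt, hcnt2, count_single]; omega
        have hlenT : (mkTitle false ks).length + P.length ≤ (mkTitle b (ks ++ [seg])).length := by
          rcases List.eq_nil_or_concat ks with rfl | ⟨ks', q, rfl⟩
          · simp only [List.nil_append]
            have hT2 : mkTitle b [seg] = P := by cases b <;> simp [mkTitle, hP, List.intercalate]
            rw [hT2]
            simp [mkTitle, strip_nil, intercalate_nil', List.intercalate]
          · rw [List.concat_eq_append] at *
            have hks : (ks' ++ [q]) ≠ [] := by simp
            cases b
            · have hT : mkTitle false ((ks' ++ [q]) ++ [seg]) =
                  PySem.Chars.lstrip (List.intercalate ['('] (ks' ++ [q])) ++ '(' :: PySem.Chars.rstrip seg := by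
                simp only [mkTitle, if_neg (by simp : ¬ (false = true))]
                rw [intercalate_concat '(' _ hks seg, strip_append_cons '(' (by decide)]
              have hPv : P = PySem.Chars.rstrip seg := by simp [hP, hks]
              have h1 : (mkTitle false (ks' ++ [q])).length ≤
                  (PySem.Chars.lstrip (List.intercalate ['('] (ks' ++ [q]))).length := by
                simp only [mkTitle, if_neg (by simp : ¬ (false = true))]
                rw [show PySem.Chars.strip (List.intercalate ['('] (ks' ++ [q])) =
                    PySem.Chars.strip (PySem.Chars.lstrip (List.intercalate ['('] (ks' ++ [q])))
                  from (strip_lstrip _).symm]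
                exact length_strip_le _
              rw [hT, hPv]
              simp only [List.length_append, List.length_cons]
              omega
            · have hT : mkTitle true ((ks' ++ [q]) ++ [seg]) =
                  List.intercalate ['('] (ks' ++ [q]) ++ '(' :: seg := by
                simp only [mkTitle, if_pos]
                exact intercalate_concat '(' _ hks seg
              have hPv : P = seg := by simp [hP]
              have h1 : (mkTitle false (ks' ++ [q])).length ≤
                  (List.intercalate ['('] (ks' ++ [q])).length := by
                simp only [mkTitle, if_neg (by simp : ¬ (false = true))]
                exact length_strip_le _
              rw [hT, hPv]
              simp only [List.length_append, List.length_cons]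
              omega
        have hPcount : P.count ')' ≤ P.length := List.count_le_length
        have hf' : (mkTitle false ks).length +
            ((P ++ '(' :: ser).count ')' - (P ++ '(' :: ser).count '(') < f := by
          rw [hd', count_single]
          omega
        have ihc := ih ks (P ++ '(' :: ser) false hkfree hle' hf'
        rw [hd'] at ihc
        have hstepB : pieceWalk (ks ++ [seg]) [] b (ser.count ')' - ser.count '(') =
            ((pieceWalk ks [] false ((ser.count ')' - ser.count '(') + PySem.Chars.count P [')'] - 1)).1,
              [P] ++ (pieceWalk ks [] false ((ser.count ')' - ser.count '(') + PySem.Chars.count P [')'] - 1)).2.1,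
              (pieceWalk ks [] false ((ser.count ')' - ser.count '(') + PySem.Chars.count P [')'] - 1)).2.2) := by
          rw [pieceWalk_step ks seg [] b _ hdpos, ← hP, pieceWalk_acc]
          simp
        rw [hstepA, hstepB]
        refine ⟨ihc.1, ?_⟩
        rw [ihc.2]
        simp

theorem string_ofList_nil : String.ofList ([] : List Char) = "" := rfl

-- ---- whitespace-suffix/prefix decompositions and count preservation ----
theorem lstrip_decomp (s : List Char) :
    ∃ w, s = w ++ PySem.Chars.lstrip s ∧ ∀ c ∈ w, PySem.Chars.isspace c = true := by
  refine ⟨s.takeWhile PySem.Chars.isspace, ?_, ?_⟩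
  · unfold PySem.Chars.lstrip
    exact (List.takeWhile_append_dropWhile).symm
  · intro c hc; exact List.mem_takeWhile_imp hc

theorem rstrip_decomp (s : List Char) :
    ∃ w, s = PySem.Chars.rstrip s ++ w ∧ ∀ c ∈ w, PySem.Chars.isspace c = true := by
  refine ⟨(s.reverse.takeWhile PySem.Chars.isspace).reverse, ?_, ?_⟩
  · unfold PySem.Chars.rstrip
    conv_lhs => rw [← List.reverse_reverse s,
      ← List.takeWhile_append_dropWhile (p := PySem.Chars.isspace) (l := s.reverse)]
    rw [List.reverse_append]
  · intro c hc
    rw [List.mem_reverse] at hc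
    exact List.mem_takeWhile_imp hc

theorem count_paren_lstrip (s : List Char) :
    (PySem.Chars.lstrip s).count ')' = s.count ')' := by
  obtain ⟨w, hw, hws⟩ := lstrip_decomp s
  conv_rhs => rw [hw]
  rw [count_append_char,
    count_eq_zero_of_not_mem' ')' w (fun hmem => absurd (hws _ hmem) (by decide))]
  omega

theorem count_paren_rstrip (s : List Char) :
    (PySem.Chars.rstrip s).count ')' = s.count ')' := by
  obtain ⟨w, hw, hws⟩ := rstrip_decomp s
  conv_rhs => rw [hw]
  rw [count_append_char,
    count_eq_zero_of_not_mem' ')' w (fun hmem => absurd (hws _ hmem) (by decide))]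
  omega

theorem count_paren_strip (s : List Char) :
    (PySem.Chars.strip s).count ')' = s.count ')' := by
  unfold PySem.Chars.strip
  rw [count_paren_rstrip, count_paren_lstrip]

-- ---- rstrip is the identity when the last character is not whitespace ----
theorem rstrip_eq_self_of_last (s : List Char)
    (h : ∀ ch, s.getLast? = some ch → PySem.Chars.isspace ch = false) :
    PySem.Chars.rstrip s = s := by
  unfold PySem.Chars.rstrip
  cases hs : s.reverse with
  | nil =>
    have : s = [] := by simpa using congrArg List.reverse hs
    simp [this]
  | cons x t =>
    have hlast : s.getLast? = some x := by
      rw [← List.head?_reverse, hs]; rfl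
    rw [List.dropWhile_cons, if_neg (by simp [h x hlast])]
    rw [← hs, List.reverse_reverse]

theorem strip_eq_lstrip_of_rstrip_fixed (s : List Char) (h : PySem.Chars.rstrip s = s) :
    PySem.Chars.strip s = PySem.Chars.lstrip s := by
  unfold PySem.Chars.strip
  obtain ⟨w, hw, hws⟩ := lstrip_decomp s
  apply rstrip_eq_self_of_last
  intro ch hch
  have hlast : s.getLast? = some ch := by
    conv_lhs => rw [hw]
    rw [List.getLast?_append_of_ne_nil]
    · exact hch
    · intro hnil; rw [hnil] at hch; simp at hch
  -- last char of s is not whitespace, else rstrip would drop it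
  by_contra hcontra
  have hch' : PySem.Chars.isspace ch = true := by
    cases hcc : PySem.Chars.isspace ch
    · exact absurd hcc hcontra
    · rfl
  obtain ⟨t, ht⟩ := List.getLast?_eq_some_iff.mp hlast
  have : PySem.Chars.rstrip s ≠ s := by
    rw [ht]
    intro heq
    have hlen := congrArg List.length heq
    unfold PySem.Chars.rstrip at hlen
    rw [List.reverse_append] at hlen
    simp only [List.reverse_cons, List.reverse_nil, List.nil_append, List.length_reverse] at hlen
    rw [List.singleton_append, List.dropWhile_cons, if_pos (by simp [hch'])] at hlen
    have := List.Sublist.length_le (List.dropWhile_sublist (l := t.reverse) PySem.Chars.isspace)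
    simp at hlen this
    omega
  exact this h

-- ---- lstrip absorption: pre-lstripping the left part changes nothing ----
theorem lstrip_absorb (u v : List Char) :
    PySem.Chars.lstrip (PySem.Chars.lstrip u ++ v) = PySem.Chars.lstrip (u ++ v) := by
  unfold PySem.Chars.lstrip
  rw [List.dropWhile_append, List.dropWhile_append, dropWhile_idem']

theorem strip_absorb (u v : List Char) :
    PySem.Chars.strip (PySem.Chars.lstrip u ++ v) = PySem.Chars.strip (u ++ v) := by
  unfold PySem.Chars.strip
  rw [lstrip_absorb]

-- ---- loopCut lemmas ----
theorem loopCut_append (qs : List (List Char)) (p : List Char) :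
    ∀ (m d : Nat), m ≤ qs.length → loopCut (qs ++ [p]) m d = loopCut qs m d := by
  intro m
  induction m with
  | zero => intro d _; rfl
  | succ m ih =>
    intro d hm
    rw [loopCut, loopCut]
    by_cases hd : 0 < d
    · rw [if_pos hd, if_pos hd]
      rw [List.getD_append _ _ _ _ (by omega), ih _ (by omega)]
    · rw [if_neg hd, if_neg hd]

theorem loopCut_le (qs : List (List Char)) : ∀ (m d : Nat), (loopCut qs m d).1 ≤ m := by
  intro m
  induction m with
  | zero => intro d; simp [loopCut]
  | succ m ih =>
    intro d
    rw [loopCut]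
    by_cases hd : 0 < d
    · rw [if_pos hd]; exact le_trans (ih _) (by omega)
    · rw [if_neg hd]

-- ---- explicit description of the pieces the walk records ----
def piecesOf (exh : Bool) : List (List Char) → Bool → List (List Char)
  | [], _ => []
  | e :: rest, first =>
    (if first then e
     else if rest = [] ∧ exh = true then PySem.Chars.strip e else PySem.Chars.rstrip e)
      :: piecesOf exh rest false

-- the walk = the countdown: same stop index, same final need, pieces as described
theorem walk_bridge :
    ∀ (kept : List (List Char)) (d : Nat) (first : Bool),
      pieceWalk kept [] first d =
        (kept.take (loopCut kept kept.length d).1,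
         piecesOf (decide ((loopCut kept kept.length d).1 = 0))
           ((kept.drop (loopCut kept kept.length d).1).reverse) first,
         (loopCut kept kept.length d).2) := by
  intro kept
  induction kept using List.reverseRecOn with
  | nil =>
    intro d first
    rw [pieceWalk_stop _ _ _ _ (by simp)]
    simp [loopCut, piecesOf]
  | append_singleton ks seg ih =>
    intro d first
    by_cases hd : 0 < d
    · set P := if first then seg
        else if ks = [] then PySem.Chars.strip seg else PySem.Chars.rstrip seg with hP
      have hPcnt : PySem.Chars.count P [')'] = PySem.Chars.count seg [')'] := by
        rw [count_single, count_single, hP]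
        split
        · rfl
        · split
          · exact count_paren_strip seg
          · exact count_paren_rstrip seg
      have hgetD : (ks ++ [seg]).getD ks.length [] = seg := by
        rw [List.getD_eq_getElem?_getD]
        simp
      have hlen : (ks ++ [seg]).length = ks.length + 1 := by simp
      have hstepW := pieceWalk_step ks seg [] first d hd
      rw [← hP] at hstepW
      have hcut : loopCut (ks ++ [seg]) (ks ++ [seg]).length d
          = loopCut ks ks.length (d + PySem.Chars.count P [')'] - 1) := by
        rw [hlen, loopCut, if_pos hd, hgetD, hPcnt, loopCut_append _ _ _ _ le_rfl]
      rw [hstepW, pieceWalk_acc, ih (d + PySem.Chars.count P [')'] - 1) false, hcut]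
      set r := loopCut ks ks.length (d + PySem.Chars.count P [')'] - 1) with hr
      have hle : r.1 ≤ ks.length := by rw [hr]; exact loopCut_le ks _ _
      have htake : (ks ++ [seg]).take r.1 = ks.take r.1 := List.take_append_of_le_length hle
      have hdrop : (ks ++ [seg]).drop r.1 = ks.drop r.1 ++ [seg] := List.drop_append_of_le_length hle
      have hpc : ([] : List (List Char)) ++ [P] ++ piecesOf (decide (r.1 = 0)) ((ks.drop r.1).reverse) false
          = piecesOf (decide (r.1 = 0)) (((ks ++ [seg]).drop r.1).reverse) first := by
        rw [hdrop, List.reverse_append]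
        simp only [List.reverse_cons, List.reverse_nil, List.nil_append, List.singleton_append]
        rw [piecesOf]
        congr 1
        rw [hP]
        by_cases hfirst : first = true
        · simp [hfirst]
        · have hf : first = false := by cases first; rfl; exact absurd rfl hfirst
          subst hf
          simp only [Bool.false_eq_true, if_false]
          by_cases hks : ks = []
          · subst hks
            have hr0 : r = (0, d + PySem.Chars.count P [')'] - 1) := by rw [hr]; rfl
            rw [hr0]
            simp
          · rw [if_neg hks]
            have : ¬ ((ks.drop r.1).reverse = [] ∧ decide (r.1 = 0) = true) := by
              rintro ⟨h1, h2⟩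
              have hr10 : r.1 = 0 := by simpa using h2
              rw [hr10, List.drop_zero] at h1
              exact hks (by simpa using h1)
            rw [if_neg this]
      rw [htake, ← hpc]
    · rw [pieceWalk_stop _ _ _ _ (fun hh => hd hh.1)]
      have hd0 : d = 0 := by omega
      subst hd0
      have hcut : loopCut (ks ++ [seg]) (ks ++ [seg]).length 0 = ((ks ++ [seg]).length, 0) := by
        cases hlen : (ks ++ [seg]).length with
        | zero => simp at hlen
        | succ m => rw [loopCut, if_neg (by omega)]
      rw [hcut]
      simp [piecesOf]

-- piecesOf when nothing is popped-late: just rstrip everywhere (identity on neutral segments)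
theorem piecesOf_false_eval :
    ∀ (l : List (List Char)), piecesOf false l false = l.map PySem.Chars.rstrip := by
  intro l
  induction l with
  | nil => rfl
  | cons e rest ih => simp [piecesOf, ih]

def lastStrip : List (List Char) → List (List Char)
  | [] => []
  | e :: rest =>
    (if rest = [] then PySem.Chars.strip e else PySem.Chars.rstrip e) :: lastStrip rest

theorem piecesOf_true_eval :
    ∀ (l : List (List Char)), piecesOf true l false = lastStrip l := by
  intro l
  induction l with
  | nil => rfl
  | cons e rest ih =>
    rw [piecesOf, lastStrip, ih]
    congr 1
    by_cases h : rest = [] <;> simp [h]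

theorem lastStrip_concat (ys : List (List Char)) (e : List Char) :
    lastStrip (ys ++ [e]) = ys.map PySem.Chars.rstrip ++ [PySem.Chars.strip e] := by
  induction ys with
  | nil => simp [lastStrip]
  | cons a ys ih =>
    rw [List.cons_append, lastStrip, if_neg (by simp), ih]
    simp

theorem map_rstrip_id (l : List (List Char)) (h : ∀ e ∈ l, PySem.Chars.rstrip e = e) :
    l.map PySem.Chars.rstrip = l := by
  induction l with
  | nil => rfl
  | cons e rest ih => simp [h e (by simp), ih (fun x hx => h x (by simp [hx]))]

-- ---- joining pieces back: intercalate over a concat as a flatten ----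
theorem intercalate_eq_flat :
    ∀ (l : List (List Char)) (x : List Char),
      List.intercalate ['('] (l ++ [x]) = (l.map (fun p => p ++ ['('])).flatten ++ x := by
  intro l
  induction l with
  | nil => intro x; simp [List.intercalate]
  | cons a rest ih =>
    intro x
    rw [List.cons_append, intercalate_cons_ne '(' a _ (by simp), ih]
    simp

-- ---- find on single chars : zero / positive characterizations ----
theorem find_single_zero_iff (s : List Char) (c : Char) :
    PySem.Chars.find s [c] = 0 ↔ [c] <+: s := by
  constructor
  · intro h
    have h0 : 0 ≤ PySem.Chars.find s [c] := by omega
    have := (PySem.Chars.find_spec h0).1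
    rw [h] at this
    simpa using this
  · intro h
    have hinf : [c] <:+: s := h.isInfix
    have h0 : 0 ≤ PySem.Chars.find s [c] := (PySem.Chars.find_nonneg_iff s [c]).mpr hinf
    by_contra hne
    have hpos : 0 < (PySem.Chars.find s [c]).toNat := by omega
    have := (PySem.Chars.find_spec h0).2 0 hpos
    simp at this
    exact this h

theorem find_pos_facts (s : List Char) (c : Char) (h : 0 < PySem.Chars.find s [c]) :
    c ∈ s ∧ s.head? ≠ some c := by
  have h0 : 0 ≤ PySem.Chars.find s [c] := by omega
  have hmem : c ∈ s := by
    have := (PySem.Chars.find_spec h0).1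
    exact List.mem_of_mem_drop (by simpa using this.mem (by simp))
  refine ⟨hmem, ?_⟩
  intro hhead
  have hpre : [c] <+: s := by
    cases s with
    | nil => simp at hhead
    | cons x t =>
      simp at hhead
      subst hhead
      exact ⟨t, rfl⟩
  have := (find_single_zero_iff s c).mpr hpre
  omega

-- ---- the two formatting blocks agree ----
theorem minus_cond (l : List Char) :
    (PySem.Chars.startswith l ['-'] = false) = (PySem.Chars.find l ['-'] ≠ 0) := by
  apply propext
  constructor
  · intro hsw h0
    have hpre : ['-'] <+: l := (find_single_zero_iff l '-').mp h0
    have := (PySem.Chars.startswith_iff l ['-']).mpr hpre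
    rw [hsw] at this
    exact absurd this (by decide)
  · intro hne
    cases h : PySem.Chars.startswith l ['-']
    · rfl
    · have hpre : ['-'] <+: l := (PySem.Chars.startswith_iff l ['-']).mp h
      exact absurd ((find_single_zero_iff l '-').mpr hpre) hne

theorem formatSeriesB_eq (series : List Char) : formatSeriesB series = formatSeries series := by
  unfold formatSeriesB formatSeries
  simp only [minus_cond]

-- ---- formatSeries absorbs a left lstrip when a '#' lies to the right ----
theorem rpart_append_left (c : Char) (u v : List Char) (hv : c ∈ v) :
    ∃ v1 v2, v = v1 ++ c :: v2 ∧ c ∉ v2 ∧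
      (∀ w, pyRpartition c (w ++ v) = some (w ++ v1, v2)) := by
  obtain ⟨v1, v2, rfl, hv2⟩ := exists_last_decomp c v hv
  refine ⟨v1, v2, rfl, hv2, ?_⟩
  intro w
  rw [show w ++ (v1 ++ c :: v2) = (w ++ v1) ++ c :: v2 by simp]
  exact rpart_append_last c v2 hv2 _

theorem formatSeries_absorb (u v : List Char) (hv : '#' ∈ v) :
    formatSeries (PySem.Chars.lstrip u ++ v) = formatSeries (u ++ v) := by
  obtain ⟨v1, v2, rfl, hv2, hrp⟩ := rpart_append_left '#' u v hv
  unfold formatSeries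
  rw [hrp (PySem.Chars.lstrip u), hrp u]
  simp only
  rw [show PySem.Chars.lstrip u ++ v1 = PySem.Chars.lstrip u ++ v1 from rfl]
  rw [strip_absorb u v1]

-- ---- membership/index bookkeeping for the neutral segments ----
theorem mem_drop_dropLast_getD (qs : List (List Char)) (m : Nat) (e : List Char)
    (he : e ∈ (qs.drop m).dropLast) :
    ∃ k, m ≤ k ∧ k + 1 < qs.length ∧ qs.getD k [] = e := by
  obtain ⟨i, hi, hei⟩ := List.mem_iff_getElem.mp he
  have hlen : ((qs.drop m).dropLast).length = qs.length - m - 1 := by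
    simp [List.length_dropLast, List.length_drop]
  have hi' : i < qs.length - m - 1 := by rw [hlen] at hi; exact hi
  refine ⟨m + i, by omega, by omega, ?_⟩
  have h2 : ((qs.drop m).dropLast)[i] = (qs.drop m)[i]'(by simp; omega) :=
    List.getElem_dropLast ..
  have h3 : (qs.drop m)[i]'(by simp; omega) = qs[m+i]'(by omega) := List.getElem_drop ..
  rw [List.getD_eq_getElem _ _ (by omega), ← hei, h2, h3]

theorem isEmpty_append_ne (x a : List Char) (ha : a ≠ []) :
    (x ++ a).isEmpty = false := by
  rw [List.isEmpty_eq_false_iff]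
  intro h
  exact ha (List.append_eq_nil_iff.mp h).2

theorem loopCut_zero_d (qs : List (List Char)) (m : Nat) : loopCut qs m 0 = (m, 0) := by
  cases m with
  | zero => rfl
  | succ m => rw [loopCut, if_neg (by omega)]

theorem loopCut_lt (qs : List (List Char)) (m d : Nat) (hd : 0 < d) :
    (loopCut qs (m+1) d).1 ≤ m := by
  rw [loopCut, if_pos hd]
  exact loopCut_le _ _ _

theorem getD_concat_self (ys : List (List Char)) (g : List Char) :
    (ys ++ [g]).getD ys.length [] = g := by
  rw [List.getD_eq_getElem?_getD]
  simp

theorem wsScan_seg : ∀ (u : List Char), '(' ∉ u → ∀ (rest : List Char) (d : Nat), 0 < d →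
    wsScan (u ++ rest) d = wsScan rest (d + u.count ')') := by
  intro u
  induction u with
  | nil => intro _ rest d _; simp
  | cons x xs ih =>
    intro hfree rest d hd
    simp only [List.mem_cons, not_or] at hfree
    rw [List.cons_append, wsScan, if_neg (fun h => hfree.1 h.symm)]
    rw [ih (by simpa using hfree.2) rest _ (by split <;> omega)]
    congr 1
    by_cases hx : x = ')'
    · subst hx; rw [if_pos rfl]; simp [List.count_cons]; omega
    · rw [if_neg hx]; simp [List.count_cons, hx, Ne.symm hx]

theorem head_ws_intercalate (ys : List (List Char)) (g : List Char) :
    ((List.intercalate ['('] (ys ++ [g])).reverse.head?.any PySem.Chars.isspace = true) ↔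
      (∃ ch, g.getLast? = some ch ∧ PySem.Chars.isspace ch = true) := by
  cases ys with
  | nil =>
    rw [List.nil_append, show List.intercalate ['('] [g] = g by simp [List.intercalate]]
    rw [List.head?_reverse]
    cases g.getLast? <;> simp
  | cons y ys' =>
    rw [intercalate_concat '(' _ (by simp) g]
    rcases List.eq_nil_or_concat g with rfl | ⟨gs, c, rfl⟩
    · simp [show PySem.Chars.isspace '(' = false from by decide]
    · rw [List.concat_eq_append]
      constructor
      · intro h
        refine ⟨c, by simp, ?_⟩
        simpa using h
      · rintro ⟨ch, hch, hws⟩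
        simp at hch
        subst hch
        simpa using hws

theorem wsScan_eq : ∀ (qs : List (List Char)), qs ≠ [] → (∀ p ∈ qs, '(' ∉ p) →
    ∀ d : Nat, 0 < d →
    (wsScan (List.intercalate ['('] qs).reverse d = true ↔
      (0 < (loopCut qs qs.length d).2 ∨
       ∃ k, (loopCut qs qs.length d).1 ≤ k ∧ k + 1 < qs.length ∧
         ∃ ch, (qs.getD k []).getLast? = some ch ∧ PySem.Chars.isspace ch = true)) := by
  intro qs
  induction qs using List.reverseRecOn with
  | nil => intro h; exact absurd rfl h
  | append_singleton ks seg ih =>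
    intro _ hfree d hd
    have hsegfree : '(' ∉ seg := hfree seg (by simp)
    have hsegrev : '(' ∉ seg.reverse := by simpa using hsegfree
    have hcnt : seg.reverse.count ')' = seg.count ')' := List.count_reverse ..
    rcases List.eq_nil_or_concat ks with rfl | ⟨ys, g, hys⟩
    · rw [List.nil_append, show List.intercalate ['('] [seg] = seg by simp [List.intercalate]]
      rw [← List.append_nil seg.reverse, wsScan_seg seg.reverse hsegrev [] d hd, hcnt]
      have hK : loopCut [seg] ([seg] : List (List Char)).length d
          = (0, d + PySem.Chars.count seg [')'] - 1) := by
        show loopCut [seg] 1 d = _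
        rw [loopCut, if_pos hd]
        rfl
      rw [hK, count_single]
      show decide (1 < d + seg.count ')') = true ↔ _
      rw [decide_eq_true_eq]
      constructor
      · intro h; left; simp; omega
      · rintro (h | ⟨k, _, hk2, _⟩)
        · simp at h; omega
        · simp at hk2
      
    · rw [List.concat_eq_append] at hys
      subst hys
      have hT : List.intercalate ['('] ((ys ++ [g]) ++ [seg])
          = List.intercalate ['('] (ys ++ [g]) ++ '(' :: seg :=
        intercalate_concat '(' _ (by simp) seg
      have hrev : (List.intercalate ['('] (ys ++ [g]) ++ '(' :: seg).reverse
          = seg.reverse ++ '(' :: (List.intercalate ['('] (ys ++ [g])).reverse := by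
        simp
      rw [hT, hrev, wsScan_seg seg.reverse hsegrev _ d hd, hcnt, wsScan, if_pos rfl]
      have hstep : loopCut ((ys ++ [g]) ++ [seg]) (((ys ++ [g]) ++ [seg]).length) d
          = loopCut (ys ++ [g]) (ys ++ [g]).length (d + seg.count ')' - 1) := by
        rw [show (((ys ++ [g]) ++ [seg]).length) = (ys ++ [g]).length + 1 by simp, loopCut,
          if_pos hd, getD_concat_self (ys ++ [g]) seg, count_single,
          loopCut_append _ _ _ _ le_rfl]
      rw [hstep]
      by_cases hstop : d + seg.count ')' = 1
      · rw [if_pos hstop, hstop]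
        rw [show (1 : Nat) - 1 = 0 from rfl, loopCut_zero_d]
        constructor
        · intro h; simp at h
        · rintro (h | ⟨k, hk1, hk2, _⟩)
          · simp at h
          · simp at hk1 hk2; omega
      · rw [if_neg hstop]
        have hd2 : 0 < d + seg.count ')' - 1 := by omega
        have hih := ih (by simp) (fun p hp => hfree p (by simp at hp ⊢; tauto))
          (d + seg.count ')' - 1) hd2
        rw [Bool.or_eq_true, hih, head_ws_intercalate ys g]
        set r := loopCut (ys ++ [g]) (ys ++ [g]).length (d + seg.count ')' - 1) with hr
        have hrlt : r.1 ≤ ys.length := by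
          rw [hr, show (ys ++ [g]).length = ys.length + 1 by simp]
          exact loopCut_lt _ _ _ hd2
        have hgetg : ((ys ++ [g]) ++ [seg]).getD ys.length [] = g := by
          rw [List.getD_append _ _ _ _ (by simp), getD_concat_self]
        constructor
        · rintro (⟨ch, hch, hws⟩ | h0 | ⟨k, hk1, hk2, hP⟩)
          · right
            refine ⟨ys.length, hrlt, by simp, ch, ?_, hws⟩
            rw [hgetg]
            exact hch
          · left; exact h0
          · right
            refine ⟨k, hk1, by simp at hk2 ⊢; omega, ?_⟩
            rw [List.getD_append _ _ _ _ (by simp at hk2; simp; omega)]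
            exact hP
        · rintro (h0 | ⟨k, hk1, hk2, ch, hch, hws⟩)
          · right; left; exact h0
          · have hkb : k ≤ ys.length := by simp at hk2; omega
            by_cases hkk : k = ys.length
            · left
              subst hkk
              rw [hgetg] at hch
              exact ⟨ch, hch, hws⟩
            · right; right
              refine ⟨k, hk1, by simp; omega, ch, ?_, hws⟩
              rw [List.getD_append _ _ _ _ (by simp; omega)] at hch
              exact hch

theorem takeDropWhile_all {p : Char → Bool} :
    ∀ (u : List Char), (∀ c ∈ u, p c = true) → ∀ (x : Char), p x = false → ∀ (v : List Char),
      ((u ++ x :: v).takeWhile p = u ∧ (u ++ x :: v).dropWhile p = x :: v) := by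
  intro u
  induction u with
  | nil => intro _ x hx v; simp [List.takeWhile_cons, List.dropWhile_cons, hx]
  | cons c u ih =>
    intro h x hx v
    have hc : p c = true := h c (by simp)
    obtain ⟨h1, h2⟩ := ih (fun d hd => h d (by simp [hd])) x hx v
    simp [List.takeWhile_cons, List.dropWhile_cons, hc, h1, h2]

theorem dCheck_true (T a bb : List Char) (hplfree : '(' ∉ a ++ ')' :: bb) (hbb : ')' ∉ bb)
    (h1 : '#' ∈ a) (h2 : a.head? ≠ some '#') (h3 : 0 < a.count ')')
    (h4 : wsScan T.reverse (a.count ')') = true) :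
    dCheck (T ++ '(' :: (a ++ ')' :: bb)) = true := by
  have hrev : (T ++ '(' :: (a ++ ')' :: bb)).reverse
      = (a ++ ')' :: bb).reverse ++ '(' :: T.reverse := by simp
  have hall : ∀ c ∈ (a ++ ')' :: bb).reverse, (c != '(') = true := by
    intro c hc
    rw [List.mem_reverse] at hc
    simp only [bne_iff_ne, ne_eq]
    intro h; subst h; exact hplfree hc
  obtain ⟨htw, hdw⟩ := takeDropWhile_all _ hall '(' (by simp) T.reverse
  have haor : afterOpenRev (T ++ '(' :: (a ++ ')' :: bb)) = (a ++ ')' :: bb).reverse := by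
    unfold afterOpenRev
    rw [hrev]
    exact htw
  have hrev2 : (a ++ ')' :: bb).reverse = bb.reverse ++ ')' :: a.reverse := by simp
  have hall2 : ∀ c ∈ bb.reverse, (c != ')') = true := by
    intro c hc
    rw [List.mem_reverse] at hc
    simp only [bne_iff_ne, ne_eq]
    intro h; subst h; exact hbb hc
  obtain ⟨_, hdw2⟩ := takeDropWhile_all _ hall2 ')' (by simp) a.reverse
  have hir : innerRev (T ++ '(' :: (a ++ ')' :: bb)) = a.reverse := by
    unfold innerRev
    rw [haor, hrev2, hdw2]
    rfl
  unfold dCheck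
  rw [haor, hir, hrev, hdw]
  simp only [List.tail_cons, Bool.and_eq_true, List.contains_iff_mem, bne_iff_ne, ne_eq,
    Bool.not_eq_true', beq_eq_false_iff_ne, List.getLast?_reverse, List.count_reverse]
  refine ⟨⟨⟨⟨⟨by simp, by simp⟩, by simp [h1]⟩, by simpa using h2⟩, by omega⟩, h4⟩

-- ---- the main glue: on the hash branch, with ¬D_, A's loop output equals B's slices ----
theorem mainGlue (text : String) (qs : List (List Char)) (a bb : List Char)
    (hpre : Pre_convert_goodreads_title_with_series_py text)
    (hqs : qs ≠ [])
    (hfree : ∀ p ∈ qs, '(' ∉ p)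
    (hplfree : '(' ∉ a ++ ')' :: bb)
    (hbb : ')' ∉ bb)
    (hsdec : text.toList = List.intercalate ['('] qs ++ '(' :: (a ++ ')' :: bb))
    (hh : 0 < PySem.Chars.find a ['#']) :
    (String.ofList (PySem.Chars.strip (loopA ((List.intercalate ['('] qs).length + PySem.Chars.count a [')'] + 1) (List.intercalate ['('] qs) a).1),
     String.ofList (if (loopA ((List.intercalate ['('] qs).length + PySem.Chars.count a [')'] + 1) (List.intercalate ['('] qs) a).2.isEmpty = true
        then (loopA ((List.intercalate ['('] qs).length + PySem.Chars.count a [')'] + 1) (List.intercalate ['('] qs) a).2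
        else formatSeries (loopA ((List.intercalate ['('] qs).length + PySem.Chars.count a [')'] + 1) (List.intercalate ['('] qs) a).2))
    = (String.ofList (PySem.Chars.strip (List.intercalate ['('] ((qs ++ [a ++ ')' :: bb]).take
          (loopCut (qs ++ [a ++ ')' :: bb]) ((qs ++ [a ++ ')' :: bb]).length - 1) (PySem.Chars.count a [')'])).1))),
       String.ofList (formatSeriesB (List.intercalate ['('] (((qs ++ [a ++ ')' :: bb]).drop
          (loopCut (qs ++ [a ++ ')' :: bb]) ((qs ++ [a ++ ')' :: bb]).length - 1) (PySem.Chars.count a [')'])).1).dropLast ++ [a])))) := by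
  set plast := a ++ ')' :: bb with hplast
  have hafree : '(' ∉ a := fun h => hplfree (by rw [hplast]; simp [h])
  set D0 := a.count ')' with hD0def
  have hcount : PySem.Chars.count a [')'] = D0 := count_single a ')'
  have hlen1 : (qs ++ [plast]).length - 1 = qs.length := by simp
  have hcutA : loopCut (qs ++ [plast]) ((qs ++ [plast]).length - 1) (PySem.Chars.count a [')'])
      = loopCut qs qs.length D0 := by
    rw [hlen1, hcount, loopCut_append qs plast qs.length D0 le_rfl]
  set r := loopCut qs qs.length D0 with hrdef
  have hrle : r.1 ≤ qs.length := loopCut_le qs _ _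
  -- hash facts
  obtain ⟨hamem, hahead⟩ := find_pos_facts a '#' hh
  have hane : a ≠ [] := by intro h; rw [h] at hamem; simp at hamem
  -- key facts : final need is 0 and the segments the walk pops late are rstrip-neutral
  have hkey : r.2 = 0 ∧ ∀ e ∈ (qs.drop r.1).dropLast, PySem.Chars.rstrip e = e := by
    by_cases hD0z : D0 = 0
    · have hr : r = (qs.length, 0) := by rw [hrdef, hD0z]; exact loopCut_zero_d qs _
      rw [hr]
      exact ⟨rfl, by simp⟩
    · have hD0pos : 0 < D0 := by omega
      set T := List.intercalate ['('] qs with hTdef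
      have hws : ¬ (wsScan T.reverse D0 = true) := by
        intro hw
        have ht := dCheck_true T a bb (hplast ▸ hplfree) hbb hamem hahead hD0pos hw
        unfold Pre_convert_goodreads_title_with_series_py at hpre
        rw [hsdec, hplast] at hpre
        rw [ht] at hpre
        simp at hpre
      have hiff := wsScan_eq qs hqs hfree D0 hD0pos
      rw [← hrdef, ← hTdef] at hiff
      have hfalse : ¬ (0 < r.2 ∨ ∃ k, r.1 ≤ k ∧ k + 1 < qs.length ∧
          ∃ ch, (qs.getD k []).getLast? = some ch ∧ PySem.Chars.isspace ch = true) :=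
        fun h => hws (hiff.mpr h)
      have hr2 : r.2 = 0 := by
        by_contra hc
        exact hfalse (Or.inl (by omega))
      refine ⟨hr2, ?_⟩
      intro e he
      apply rstrip_eq_self_of_last
      intro ch hch
      by_contra hwsc
      have hws' : PySem.Chars.isspace ch = true := by
        cases hx : PySem.Chars.isspace ch
        · exact absurd hx hwsc
        · rfl
      obtain ⟨k, hk1, hk2, hk3⟩ := mem_drop_dropLast_getD qs r.1 e he
      exact hfalse (Or.inr ⟨k, hk1, hk2, ch, by rw [hk3]; exact hch, hws'⟩)
  obtain ⟨hr2, hneutral⟩ := hkey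
  -- A's loop through the walk characterization
  have hcnt0 : a.count '(' = 0 := count_eq_zero_of_not_mem' '(' a hafree
  have hdd : a.count ')' - a.count '(' = D0 := by omega
  have hT : mkTitle true qs = List.intercalate ['('] qs := by simp [mkTitle]
  have hA := loopA_eq_walk ((List.intercalate ['('] qs).length + PySem.Chars.count a [')'] + 1)
      qs a true hfree (by omega)
      (by rw [hT, hdd, hcount]; omega)
  rw [hT, hdd] at hA
  obtain ⟨hA1, hA2⟩ := hA
  have hW := walk_bridge qs D0 true
  rw [← hrdef] at hW
  have hw1 : (pieceWalk qs [] true D0).1 = qs.take r.1 := by rw [hW]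
  have hw2 : (pieceWalk qs [] true D0).2.1
      = piecesOf (decide (r.1 = 0)) ((qs.drop r.1).reverse) true := by rw [hW]
  have hw3 : (pieceWalk qs [] true D0).2.2 = r.2 := by rw [hW]
  rw [hw1] at hA1
  rw [hw2, hw3, hr2] at hA2
  simp only [List.replicate_zero, List.nil_append] at hA2
  -- reconcile the pieces with the raw segments
  have hpieces :
      ((piecesOf (decide (r.1 = 0)) ((qs.drop r.1).reverse) true).reverse.map (fun p => p ++ ['('])).flatten
          = ((qs.drop r.1).map (fun p => p ++ ['('])).flatten
    ∨ (r.1 = 0 ∧ ∃ q0 ytail, qs = q0 :: ytail ∧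
        ((piecesOf (decide (r.1 = 0)) ((qs.drop r.1).reverse) true).reverse.map (fun p => p ++ ['('])).flatten
          = (PySem.Chars.lstrip q0 ++ ['(']) ++ ((ytail.map (fun p => p ++ ['('])).flatten)) := by
    rcases List.eq_nil_or_concat (qs.drop r.1) with hnil | ⟨ys, g, hys⟩
    · left
      rw [hnil]
      simp [piecesOf]
    · rw [List.concat_eq_append] at hys
      have hpop : (qs.drop r.1).reverse = g :: ys.reverse := by rw [hys]; simp
      have hysdl : (qs.drop r.1).dropLast = ys := by rw [hys]; simp
      by_cases hr1 : r.1 = 0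
      · have hqs_rs : qs.drop r.1 = qs := by rw [hr1]; simp
        cases hys2 : ys with
        | nil =>
          left
          rw [hpop, hys2, hys, hys2]
          simp [piecesOf]
        | cons q0 ytail0 =>
          right
          refine ⟨hr1, q0, ytail0 ++ [g], by rw [← hqs_rs, hys, hys2]; simp, ?_⟩
          rw [hpop, hr1]
          simp only [decide_true]
          rw [piecesOf, if_pos rfl, piecesOf_true_eval, hys2]
          rw [show (q0 :: ytail0).reverse = ytail0.reverse ++ [q0] by simp, lastStrip_concat]
          have hneut' : ∀ e ∈ ytail0, PySem.Chars.rstrip e = e := by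
            intro e hee
            exact hneutral e (by rw [hysdl, hys2]; simp [hee])
          have hq0n : PySem.Chars.rstrip q0 = q0 :=
            hneutral q0 (by rw [hysdl, hys2]; simp)
          rw [map_rstrip_id _ (by intro e hee; rw [List.mem_reverse] at hee; exact hneut' e hee)]
          rw [strip_eq_lstrip_of_rstrip_fixed q0 hq0n]
          simp
      · left
        rw [hpop]
        have hdecr : decide (r.1 = 0) = false := by simp [hr1]
        rw [hdecr, piecesOf, if_pos rfl, piecesOf_false_eval]
        rw [map_rstrip_id _ (by
          intro e hee
          rw [List.mem_reverse] at hee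
          exact hneutral e (by rw [hysdl]; exact hee))]
        rw [show (g :: ys.reverse).reverse = ys ++ [g] by simp, ← hys]
  -- B's slices
  have htakeB : (qs ++ [plast]).take r.1 = qs.take r.1 :=
    List.take_append_of_le_length hrle
  have hserB : List.intercalate ['('] (((qs ++ [plast]).drop r.1).dropLast ++ [a])
      = ((qs.drop r.1).map (fun p => p ++ ['('])).flatten ++ a := by
    rw [List.drop_append_of_le_length hrle, List.dropLast_concat, intercalate_eq_flat]
  -- assemble
  rw [hcutA]
  simp only [Prod.mk.injEq]
  constructor
  · rw [hA1, htakeB]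
  · rw [hA2, hserB, formatSeriesB_eq]
    rcases hpieces with hP | ⟨hr1, q0, ytail, hqsdec, hP⟩
    · rw [hP]
      rw [isEmpty_append_ne _ a hane]
      simp only [Bool.false_eq_true, if_false]
    · rw [hP]
      rw [show (PySem.Chars.lstrip q0 ++ ['(']) ++ (ytail.map (fun p => p ++ ['('])).flatten ++ a
          = PySem.Chars.lstrip q0 ++ (['('] ++ ((ytail.map (fun p => p ++ ['('])).flatten ++ a)) by simp]
      rw [isEmpty_append_ne _ _ (by
        intro h
        exact hane (List.append_eq_nil_iff.mp (List.append_eq_nil_iff.mp h).2).2)]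
      simp only [Bool.false_eq_true, if_false]
      rw [formatSeries_absorb q0 _ (by simp [hamem])]
      congr 1
      rw [hr1, List.drop_zero, hqsdec]
      simp

-- ===== VERDICT (by name: the statements are the Claim_ definitions above) =====
theorem convert_goodreads_title_with_series_py_spec : Claim_equal_convert_goodreads_title_with_series_py := by
  intro text _ hpre
  unfold Spec_convert_goodreads_title_with_series_py
  simp only [convert_goodreads_title_with_series_py, convert_goodreads_title_with_series_py_alt]
  set s := text.toList with hs
  have hsplit : PySem.Chars.splitOn s ['('] = myS '(' [] s := splitOn_single s '('
  by_cases hmem : '(' ∈ s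
  · have hfind : ¬ (PySem.Chars.find s ['('] = -1) :=
      fun h => (find_single_eq_neg_one_iff s '(').mp h hmem
    have hne := myS_ne_nil '(' s []
    rcases List.eq_nil_or_concat (myS '(' [] s) with hnil | ⟨qs, plast, hparts⟩
    · exact absurd hnil hne
    rw [List.concat_eq_append] at hparts
    have hfree : ∀ p ∈ myS '(' [] s, '(' ∉ p := myS_free '(' s [] (by simp)
    have hITC : List.intercalate ['('] (myS '(' [] s) = s := by
      simpa using myS_intercalate '(' s []
    have hqs : qs ≠ [] := by
      intro hq
      rw [hq] at hparts
      have h1 : (myS '(' [] s).length = 1 := by rw [hparts]; simp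
      exact ((myS_length_one_iff '(' s []).mp h1) hmem
    have hlen1 : ¬ ((qs ++ [plast]).length = 1) := by
      have := List.length_pos_of_ne_nil hqs
      simp only [List.length_append, List.length_cons, List.length_nil]
      omega
    have hplfree : '(' ∉ plast := hfree plast (by rw [hparts]; simp)
    have hqsfree : ∀ p ∈ qs, '(' ∉ p := fun p hp => hfree p (by rw [hparts]; simp [hp])
    have hsdec : s = List.intercalate ['('] qs ++ '(' :: plast := by
      rw [← hITC, hparts, intercalate_concat '(' qs hqs plast]
    have hrp : pyRpartition '(' s = some (List.intercalate ['('] qs, plast) := by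
      rw [hsdec]; exact rpart_append_last '(' plast hplfree _
    by_cases hpm : ')' ∈ plast
    · obtain ⟨a, bb, hpl, hbb⟩ := exists_last_decomp ')' plast hpm
      have hrp2 : pyRpartition ')' plast = some (a, bb) := by
        rw [hpl]; exact rpart_append_last ')' bb hbb a
      have hrf : PySem.Chars.rfind plast [')'] = (a.length : Int) := by
        rw [hpl]; exact rfind_single_last a bb ')' hbb
      have h0a : ¬ ((a.length : Int) = -1) := by omega
      have hslice : PySem.List.slice plast none (some ((a.length : Nat) : Int)) = a := by
        rw [PySem.List.slice_to plast (by exact_mod_cast Nat.zero_le _), Int.toNat_natCast, hpl,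
          List.take_left' rfl]
      have hafree : '(' ∉ a := fun ha => hplfree (by rw [hpl]; simp [ha])
      by_cases hh : PySem.Chars.find a ['#'] ≤ 0
      · simp only [hfind, hsplit, hparts, hlen1, hrp, List.getLastD_concat,
          hrp2, hrf, h0a, hslice, hh, if_false, if_true, ite_false, ite_true]
        simp [hh, string_ofList_nil]
      · have hhpos : 0 < PySem.Chars.find a ['#'] := by omega
        have hsdec' : text.toList = List.intercalate ['('] qs ++ '(' :: (a ++ ')' :: bb) := by
          rw [← hs, hsdec, hpl]
        have hplf : '(' ∉ a ++ ')' :: bb := by rw [← hpl]; exact hplfree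
        have hmain := mainGlue text qs a bb hpre hqs hqsfree hplf hbb hsdec' hhpos
        simp only [hfind, hsplit, hparts, hlen1, hrp, List.getLastD_concat,
          hrp2, hrf, h0a, hslice, hh, if_false, ite_false]
        rw [← hpl] at hmain
        rw [if_pos h0a, if_neg hh]
        exact hmain
    · have hrp2 : pyRpartition ')' plast = none := rpart_of_not_mem ')' plast hpm
      have hrf : PySem.Chars.rfind plast [')'] = -1 := rfind_single_not_mem plast ')' hpm
      have hneg : ¬ (¬ ((-1 : Int) = -1)) := by omega
      have hhn : PySem.Chars.find ([] : List Char) ['#'] ≤ 0 := by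
        rw [find_nil_single]; omega
      simp only [hfind, hsplit, hparts, hlen1, hrp, List.getLastD_concat, hrp2, hrf, hneg, hhn]
      simp [hhn, string_ofList_nil, find_nil_single]
  · rw [if_pos ((find_single_eq_neg_one_iff s '(').mpr hmem)]
    rw [hsplit, if_pos ((myS_length_one_iff '(' s []).mpr hmem)]
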